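-- pv_equiv track=rewrite | github.com/YUANXICHE98/KGRL | src/agents/rag_react_agent.py | reason_and_act
-- ===== SOURCE A (Python) =====
-- from typing import Dict, Any, List
--
-- def reason_and_act(context: Dict[str, Any], available_actions: List[str]) -> str:
--     """Mock ReAct reasoning."""
--     observation = context["observation"]
--
--     # Simple reasoning based on observation
--     if "key" in observation.lower():
--         for action in available_actions:
--             if "take" in action.lower():
--                 return action
--
--     if "door" in observation.lower():
--         for action in available_actions:
--             if "open" in action.lower() or "use" in action.lower():
--                 return action
--
--     # Default to examine
--     for action in available_actions:
--         if "examine" in action.lower():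
--             return action
--
--     return available_actions[0] if available_actions else "wait"
-- ===== SOURCE B (Python) =====
-- def reason_and_act(context, available_actions):
--     """One pass over available_actions recording the first action of each kind,
--     then a single decision on the observation (A rescans the list per rule)."""
--     first_take = first_openuse = first_examine = None
--     for action in available_actions:
--         a = action.lower()
--         if first_take is None and "take" in a:
--             first_take = action
--         if first_openuse is None and ("open" in a or "use" in a):
--             first_openuse = action
--         if first_examine is None and "examine" in a:
--             first_examine = action
--     obs = context["observation"].lower()
--     if "key" in obs and first_take is not None:
--         return first_take
--     if "door" in obs and first_openuse is not None:
--         return first_openuse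
--     if first_examine is not None:
--         return first_examine
--     return available_actions[0] if available_actions else "wait"
-- ===== Notes on version B (the rewrite author's own statement) =====
-- stated objective: alternative
-- what changed: A scans available_actions up to three times (once per rule); B makes a single pass maintaining the first 'take', first 'open'/'use' and first 'examine' action, then decides once from the observation.
import Mathlib
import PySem

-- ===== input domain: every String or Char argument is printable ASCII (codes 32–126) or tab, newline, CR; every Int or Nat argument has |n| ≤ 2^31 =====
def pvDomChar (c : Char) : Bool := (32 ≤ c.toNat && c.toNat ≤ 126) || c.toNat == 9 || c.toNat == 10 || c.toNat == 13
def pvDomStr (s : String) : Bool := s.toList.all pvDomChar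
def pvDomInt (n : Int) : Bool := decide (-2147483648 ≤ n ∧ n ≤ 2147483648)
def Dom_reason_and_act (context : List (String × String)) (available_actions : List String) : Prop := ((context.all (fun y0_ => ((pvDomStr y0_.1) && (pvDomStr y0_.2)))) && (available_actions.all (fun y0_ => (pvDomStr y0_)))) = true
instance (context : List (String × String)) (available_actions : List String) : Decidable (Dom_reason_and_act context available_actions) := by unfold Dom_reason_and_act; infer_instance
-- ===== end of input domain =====

-- B makes ONE pass over available_actions, recording the first action of each kind, then
-- decides once from the observation; A rescans the list for each rule. Same return value.

-- ===== PORT A =====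
-- 'for action in …: if p(action): return action' as a first-match scan
def pvFindFirst (p : String → Bool) : List String → Option String
  | [] => none
  | a :: rest => if p a then some a else pvFindFirst p rest

def reason_and_act (context : List (String × String)) (available_actions : List String) : String :=
  match (PySem.Dict.mk context).get? "observation" with
  | none => "wait"  -- Python raises KeyError here; excluded by Pre_
  | some observation =>
    match (if PySem.Str.isIn "key" (PySem.Str.lower observation) then
             pvFindFirst (fun action => PySem.Str.isIn "take" (PySem.Str.lower action)) available_actions
           else none) with
    | some a => a
    | none =>
      match (if PySem.Str.isIn "door" (PySem.Str.lower observation) then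
               pvFindFirst (fun action => PySem.Str.isIn "open" (PySem.Str.lower action) ||
                                          PySem.Str.isIn "use" (PySem.Str.lower action)) available_actions
             else none) with
      | some a => a
      | none =>
        match pvFindFirst (fun action => PySem.Str.isIn "examine" (PySem.Str.lower action)) available_actions with
        | some a => a
        | none =>
          match available_actions with
          | [] => "wait"
          | a :: _ => a

-- ===== PORT B =====
-- one fold maintaining (first_take, first_openuse, first_examine)
def pvStepB (s : Option String × Option String × Option String) (action : String) :
    Option String × Option String × Option String :=
  let a := PySem.Str.lower action
  ( (if s.1.isNone && PySem.Str.isIn "take" a then some action else s.1),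
    (if s.2.1.isNone && (PySem.Str.isIn "open" a || PySem.Str.isIn "use" a) then some action else s.2.1),
    (if s.2.2.isNone && PySem.Str.isIn "examine" a then some action else s.2.2) )

def reason_and_act_alt (context : List (String × String)) (available_actions : List String) : String :=
  let st := available_actions.foldl pvStepB (none, none, none)
  match (PySem.Dict.mk context).get? "observation" with
  | none => "wait"  -- Python raises KeyError here; excluded by Pre_
  | some obs0 =>
    let obs := PySem.Str.lower obs0
    match (if PySem.Str.isIn "key" obs then st.1 else none) with
    | some a => a
    | none =>
      match (if PySem.Str.isIn "door" obs then st.2.1 else none) with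
      | some a => a
      | none =>
        match st.2.2 with
        | some a => a
        | none =>
          match available_actions with
          | [] => "wait"
          | a :: _ => a

-- ===== PRECONDITION & SPEC =====
-- Pre_ excludes only contexts without an "observation" key, on which Python A raises KeyError.
def Pre_reason_and_act (context : List (String × String)) (available_actions : List String) : Prop :=
  ((PySem.Dict.mk context).get? "observation").isSome = true
instance (context : List (String × String)) (available_actions : List String) : Decidable (Pre_reason_and_act context available_actions) := by unfold Pre_reason_and_act; infer_instance

def pvWitness_reason_and_act : (List (String × String)) × List String :=
  ([("observation", "a key lies here")], ["take key", "examine room"])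

def Spec_reason_and_act (context : List (String × String)) (available_actions : List String) (out : String) : Prop := out = reason_and_act_alt context available_actions
instance (context : List (String × String)) (available_actions : List String) (out : String) : Decidable (Spec_reason_and_act context available_actions out) := by unfold Spec_reason_and_act; infer_instance

-- ===== CLAIM (what is proved, stated in full; the proofs are below) =====
def Claim_equal_reason_and_act : Prop := ∀ (context : List (String × String)) (available_actions : List String), Dom_reason_and_act context available_actions → Pre_reason_and_act context available_actions → Spec_reason_and_act context available_actions (reason_and_act context available_actions)

-- ===== LEMMAS AND PROOFS =====

-- the fold computes the three first-match scans componentwise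
lemma pvStepB_fold (l : List String) : ∀ s : Option String × Option String × Option String,
    l.foldl pvStepB s =
      ( s.1.or (pvFindFirst (fun a => PySem.Str.isIn "take" (PySem.Str.lower a)) l),
        s.2.1.or (pvFindFirst (fun a => PySem.Str.isIn "open" (PySem.Str.lower a) ||
                                        PySem.Str.isIn "use" (PySem.Str.lower a)) l),
        s.2.2.or (pvFindFirst (fun a => PySem.Str.isIn "examine" (PySem.Str.lower a)) l) ) := by
  induction l with
  | nil => intro s; simp [pvFindFirst]
  | cons a l ih =>
    intro s
    obtain ⟨t, o, e⟩ := s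
    simp only [List.foldl_cons, ih, pvFindFirst, pvStepB]
    refine Prod.ext ?_ (Prod.ext ?_ ?_) <;>
      cases t <;> cases o <;> cases e <;>
      by_cases h1 : PySem.Str.isIn "take" (PySem.Str.lower a) = true <;>
      by_cases h2 : (PySem.Str.isIn "open" (PySem.Str.lower a) ||
                     PySem.Str.isIn "use" (PySem.Str.lower a)) = true <;>
      by_cases h3 : PySem.Str.isIn "examine" (PySem.Str.lower a) = true <;>
      simp_all

-- ===== VERDICT (by name: the statement is the Claim_ definition above) =====
theorem reason_and_act_spec : Claim_equal_reason_and_act := by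
  intro context available_actions _ hpre
  unfold Spec_reason_and_act reason_and_act reason_and_act_alt
  rw [pvStepB_fold]
  cases hobs : (PySem.Dict.mk context).get? "observation" with
  | none => simp [Pre_reason_and_act, hobs] at hpre
  | some observation => simp only [Option.none_or]
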